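-- pv_equiv track=rewrite | github.com/ShubhamVankalas/Real-Estate-Intelligence-Platform | pipeline.py | _classify_asset
-- ===== SOURCE A (Python) =====
-- def _classify_asset(asset_str: str) -> str:
--     s = asset_str.lower()
--     if any(kw in s for kw in ["office", "offices"]):                        return "Office"
--     if any(kw in s for kw in ["residential", "apartment", "flat", "homes"]): return "Residential"
--     if any(kw in s for kw in ["hotel", "hospitality"]):                     return "Hotel"
--     if any(kw in s for kw in ["retail", "shopping", "mall"]):               return "Retail"
--     if any(kw in s for kw in ["industrial", "logistics", "warehouse"]):     return "Industrial"
--     if any(kw in s for kw in ["student", "dormitory"]):                     return "Student Housing"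
--     if any(kw in s for kw in ["mixed", "multi"]):                           return "Mixed-Use"
--     return "Mixed-Use/Other"
-- ===== SOURCE B (Python) =====
-- # Single left-to-right scan of the string: at each position, see which keyword
-- # starts there and keep the lowest category index seen; no substring searches,
-- # no early-return if-chain.
-- KEYWORDS = {
--     "office": 0, "offices": 0,
--     "residential": 1, "apartment": 1, "flat": 1, "homes": 1,
--     "hotel": 2, "hospitality": 2,
--     "retail": 3, "shopping": 3, "mall": 3,
--     "industrial": 4, "logistics": 4, "warehouse": 4,
--     "student": 5, "dormitory": 5,
--     "mixed": 6, "multi": 6,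
-- }
-- LABELS = ["Office", "Residential", "Hotel", "Retail", "Industrial",
--           "Student Housing", "Mixed-Use", "Mixed-Use/Other"]
--
-- def _classify_asset(asset_str: str) -> str:
--     s = asset_str.lower()
--     best = 7
--     for i in range(len(s)):
--         for kw, idx in KEYWORDS.items():
--             if idx < best and s.startswith(kw, i):
--                 best = idx
--     return LABELS[best]
-- ===== Notes on version B (the rewrite author's own statement) =====
-- stated objective: alternative
-- what changed: Instead of A's ordered if-chain of whole-string substring searches with early return, B makes a single left-to-right scan of the string, at each position checking which keyword starts there and keeping the minimum category index seen; the label is looked up by that index at the end.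
import Mathlib
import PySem

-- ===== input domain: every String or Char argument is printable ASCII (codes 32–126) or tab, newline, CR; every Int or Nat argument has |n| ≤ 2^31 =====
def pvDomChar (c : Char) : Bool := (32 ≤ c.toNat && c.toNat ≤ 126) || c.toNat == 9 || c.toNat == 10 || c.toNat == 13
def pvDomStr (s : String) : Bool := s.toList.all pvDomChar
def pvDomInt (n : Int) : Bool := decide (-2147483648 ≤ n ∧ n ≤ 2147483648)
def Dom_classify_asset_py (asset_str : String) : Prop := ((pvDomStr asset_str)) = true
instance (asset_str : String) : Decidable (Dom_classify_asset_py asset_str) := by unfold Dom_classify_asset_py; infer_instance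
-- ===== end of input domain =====

-- B replaces A's ordered if-chain of substring searches by a single left-to-right
-- positional scan keeping the minimum matched category index (alternative algorithm).

-- ===== PORT A =====
def classify_asset_py (asset_str : String) : String :=
  let s := (PySem.Str.lower asset_str).toList
  if ["office", "offices"].any (fun kw => PySem.Chars.isIn kw.toList s) then "Office"
  else if ["residential", "apartment", "flat", "homes"].any (fun kw => PySem.Chars.isIn kw.toList s) then "Residential"
  else if ["hotel", "hospitality"].any (fun kw => PySem.Chars.isIn kw.toList s) then "Hotel"
  else if ["retail", "shopping", "mall"].any (fun kw => PySem.Chars.isIn kw.toList s) then "Retail"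
  else if ["industrial", "logistics", "warehouse"].any (fun kw => PySem.Chars.isIn kw.toList s) then "Industrial"
  else if ["student", "dormitory"].any (fun kw => PySem.Chars.isIn kw.toList s) then "Student Housing"
  else if ["mixed", "multi"].any (fun kw => PySem.Chars.isIn kw.toList s) then "Mixed-Use"
  else "Mixed-Use/Other"

-- ===== PORT B =====
-- Source B's KEYWORDS dict as an association list (insertion order)
def kwTable : List (List Char × Nat) :=
  [("office".toList, 0), ("offices".toList, 0),
   ("residential".toList, 1), ("apartment".toList, 1), ("flat".toList, 1), ("homes".toList, 1),
   ("hotel".toList, 2), ("hospitality".toList, 2),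
   ("retail".toList, 3), ("shopping".toList, 3), ("mall".toList, 3),
   ("industrial".toList, 4), ("logistics".toList, 4), ("warehouse".toList, 4),
   ("student".toList, 5), ("dormitory".toList, 5),
   ("mixed".toList, 6), ("multi".toList, 6)]

def labelsB : List String :=
  ["Office", "Residential", "Hotel", "Retail", "Industrial",
   "Student Housing", "Mixed-Use", "Mixed-Use/Other"]

-- one inner-loop step: 'if idx < best and s.startswith(kw, i): best = idx'
-- (Python's s.startswith(kw, i) with 0 ≤ i is exactly 'kw is a prefix of s.drop i')
def stepKw (s : List Char) (i : Nat) (b : Nat) (p : List Char × Nat) : Nat :=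
  if p.2 < b ∧ PySem.Chars.startswith (s.drop i) p.1 = true then p.2 else b

-- 'best = 7; for i in range(len(s)): for kw, idx in KEYWORDS.items(): …'
def bestF (s : List Char) : Nat :=
  (List.range s.length).foldl (fun b i => kwTable.foldl (stepKw s i) b) 7

def classify_asset_py_alt (asset_str : String) : String :=
  labelsB.getD (bestF (PySem.Str.lower asset_str).toList) "Mixed-Use/Other"

-- ===== PRECONDITION & SPEC =====
def Spec_classify_asset_py (asset_str : String) (out : String) : Prop := out = classify_asset_py_alt asset_str
instance (asset_str : String) (out : String) : Decidable (Spec_classify_asset_py asset_str out) := by unfold Spec_classify_asset_py; infer_instance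

-- ===== CLAIM (what is proved, stated in full; the proofs are below) =====
def Claim_equal_classify_asset_py : Prop := ∀ (asset_str : String), Dom_classify_asset_py asset_str → Spec_classify_asset_py asset_str (classify_asset_py asset_str)

-- ===== LEMMAS AND PROOFS =====

-- 'rule k is matched' : some keyword with index k occurs in s
def MRb (s : List Char) (k : Nat) : Bool :=
  kwTable.any (fun p => p.2 == k && PySem.Chars.isIn p.1 s)

lemma inner_le (s : List Char) (i : Nat) :
    ∀ (t : List (List Char × Nat)) (b : Nat), t.foldl (stepKw s i) b ≤ b := by
  intro t
  induction t with
  | nil => intro b; simp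
  | cons p rest ih =>
      intro b
      simp only [List.foldl]
      refine le_trans (ih _) ?_
      unfold stepKw; split <;> omega

lemma inner_mem (s : List Char) (i : Nat) :
    ∀ (t : List (List Char × Nat)) (b : Nat),
      t.foldl (stepKw s i) b = b ∨
      ∃ p ∈ t, p.2 = t.foldl (stepKw s i) b ∧ PySem.Chars.startswith (s.drop i) p.1 = true := by
  intro t
  induction t with
  | nil => intro b; left; rfl
  | cons p rest ih =>
      intro b
      simp only [List.foldl]
      rcases ih (stepKw s i b p) with h | ⟨q, hq, hq2, hsw⟩
      · rw [h]
        unfold stepKw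
        split
        · right; exact ⟨p, by simp, rfl, by tauto⟩
        · left; rfl
      · right; exact ⟨q, by simp [hq], hq2, hsw⟩

lemma inner_ub (s : List Char) (i : Nat) :
    ∀ (t : List (List Char × Nat)) (b : Nat) (p : List Char × Nat), p ∈ t →
      PySem.Chars.startswith (s.drop i) p.1 = true → t.foldl (stepKw s i) b ≤ p.2 := by
  intro t
  induction t with
  | nil => intro b p hp; simp at hp
  | cons q rest ih =>
      intro b p hp hsw
      simp only [List.foldl]
      rcases List.mem_cons.mp hp with h | h
      · subst h
        refine le_trans (inner_le s i rest _) ?_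
        by_cases hlt : p.2 < b
        · simp [stepKw, hlt, hsw]
        · simp only [stepKw, hsw]
          split <;> omega
      · exact ih _ p h hsw

lemma outer_le (s : List Char) :
    ∀ (L : List Nat) (b : Nat), L.foldl (fun b i => kwTable.foldl (stepKw s i) b) b ≤ b := by
  intro L
  induction L with
  | nil => intro b; simp
  | cons j L' ih =>
      intro b
      simp only [List.foldl]
      exact le_trans (ih (kwTable.foldl (stepKw s j) b)) (inner_le s j kwTable b)

lemma outer_mem (s : List Char) :
    ∀ (L : List Nat) (b : Nat),
      L.foldl (fun b i => kwTable.foldl (stepKw s i) b) b = b ∨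
      ∃ p ∈ kwTable, p.2 = L.foldl (fun b i => kwTable.foldl (stepKw s i) b) b ∧
        ∃ i ∈ L, PySem.Chars.startswith (s.drop i) p.1 = true := by
  intro L
  induction L with
  | nil => intro b; left; rfl
  | cons j L' ih =>
      intro b
      simp only [List.foldl]
      rcases ih (kwTable.foldl (stepKw s j) b) with h | ⟨p, hp, hp2, i, hi, hsw⟩
      · rw [h]
        rcases inner_mem s j kwTable b with h2 | ⟨p, hp, hp2, hsw⟩
        · left; exact h2
        · right; exact ⟨p, hp, hp2, j, by simp, hsw⟩
      · right; exact ⟨p, hp, hp2, i, by simp [hi], hsw⟩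

lemma outer_ub (s : List Char) :
    ∀ (L : List Nat) (b : Nat) (p : List Char × Nat) (i : Nat), p ∈ kwTable → i ∈ L →
      PySem.Chars.startswith (s.drop i) p.1 = true →
      L.foldl (fun b i => kwTable.foldl (stepKw s i) b) b ≤ p.2 := by
  intro L
  induction L with
  | nil => intro b p i _ hi; simp at hi
  | cons j L' ih =>
      intro b p i hp hi hsw
      simp only [List.foldl]
      rcases List.mem_cons.mp hi with h | h
      · subst h
        exact le_trans (outer_le s L' _) (inner_ub s i kwTable b p hp hsw)
      · exact ih _ p i hp h hsw

lemma table_kw_ne_nil : ∀ p ∈ kwTable, p.1 ≠ [] := by decide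

lemma table_idx_le : ∀ p ∈ kwTable, p.2 ≤ 6 := by decide

-- the positional scan finds a keyword iff it occurs as a substring
lemma exists_pos_iff (s kw : List Char) (hkw : kw ≠ []) :
    (∃ i ∈ List.range s.length, PySem.Chars.startswith (s.drop i) kw = true) ↔
      PySem.Chars.isIn kw s = true := by
  constructor
  · rintro ⟨i, _, h⟩
    rw [← PySem.Chars.exists_prefix_drop_iff_isIn]
    exact ⟨i, (PySem.Chars.startswith_iff _ _).mp h⟩
  · intro h
    obtain ⟨j, hj⟩ := (PySem.Chars.exists_prefix_drop_iff_isIn kw s).mpr h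
    have hjlt : j < s.length := by
      by_contra hge
      rw [not_lt] at hge
      rw [List.drop_eq_nil_of_le hge] at hj
      exact hkw (List.prefix_nil.mp hj)
    exact ⟨j, List.mem_range.mpr hjlt, (PySem.Chars.startswith_iff _ _).mpr hj⟩

lemma bestF_le7 (s : List Char) : bestF s ≤ 7 := outer_le s _ 7

lemma bestF_mem (s : List Char) : bestF s = 7 ∨ (bestF s ≤ 6 ∧ MRb s (bestF s) = true) := by
  unfold bestF
  rcases outer_mem s (List.range s.length) 7 with h | ⟨p, hp, hp2, i, hi, hsw⟩
  · left; exact h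
  · right
    refine ⟨by rw [← hp2]; exact table_idx_le p hp, ?_⟩
    refine List.any_eq_true.mpr ⟨p, hp, ?_⟩
    have hin : PySem.Chars.isIn p.1 s = true :=
      (exists_pos_iff s p.1 (table_kw_ne_nil p hp)).mp ⟨i, hi, hsw⟩
    simp [hp2, hin]

lemma bestF_ub (s : List Char) (k : Nat) (h : MRb s k = true) : bestF s ≤ k := by
  obtain ⟨p, hp, hpk⟩ := List.any_eq_true.mp h
  simp only [Bool.and_eq_true, beq_iff_eq] at hpk
  obtain ⟨i, hi, hsw⟩ := (exists_pos_iff s p.1 (table_kw_ne_nil p hp)).mpr hpk.2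
  rw [← hpk.1]
  exact outer_ub s (List.range s.length) 7 p i hp hi hsw

-- abstract 'minimum matched index' argument: any r with these three properties is the first matched rule
lemma idx_eq (s : List Char) (r : Nat) (h7 : r ≤ 7)
    (hmem : r = 7 ∨ (r ≤ 6 ∧ MRb s r = true))
    (hub : ∀ k, MRb s k = true → r ≤ k) :
    r = (if MRb s 0 then 0 else if MRb s 1 then 1 else if MRb s 2 then 2
      else if MRb s 3 then 3 else if MRb s 4 then 4 else if MRb s 5 then 5
      else if MRb s 6 then 6 else 7) := by
  split_ifs with h0 h1 h2 h3 h4 h5 h6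
  · have := hub 0 h0; omega
  · have := hub 1 h1
    rcases hmem with h | ⟨hle, hMR⟩
    · omega
    · interval_cases r <;> simp_all
  · have := hub 2 h2
    rcases hmem with h | ⟨hle, hMR⟩
    · omega
    · interval_cases r <;> simp_all
  · have := hub 3 h3
    rcases hmem with h | ⟨hle, hMR⟩
    · omega
    · interval_cases r <;> simp_all
  · have := hub 4 h4
    rcases hmem with h | ⟨hle, hMR⟩
    · omega
    · interval_cases r <;> simp_all
  · have := hub 5 h5
    rcases hmem with h | ⟨hle, hMR⟩
    · omega
    · interval_cases r <;> simp_all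
  · have := hub 6 h6
    rcases hmem with h | ⟨hle, hMR⟩
    · omega
    · interval_cases r <;> simp_all
  · rcases hmem with h | ⟨hle, hMR⟩
    · exact h
    · interval_cases r <;> simp_all

lemma bestF_eq_spec (s : List Char) :
    bestF s = (if MRb s 0 then 0 else if MRb s 1 then 1 else if MRb s 2 then 2
      else if MRb s 3 then 3 else if MRb s 4 then 4 else if MRb s 5 then 5
      else if MRb s 6 then 6 else 7) :=
  idx_eq s (bestF s) (bestF_le7 s) (bestF_mem s) (bestF_ub s)

lemma MR0 (s : List Char) : MRb s 0 = (["office", "offices"].any (fun kw => PySem.Chars.isIn kw.toList s)) := by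
  simp [MRb, kwTable]
lemma MR1 (s : List Char) : MRb s 1 = (["residential", "apartment", "flat", "homes"].any (fun kw => PySem.Chars.isIn kw.toList s)) := by
  simp [MRb, kwTable]
lemma MR2 (s : List Char) : MRb s 2 = (["hotel", "hospitality"].any (fun kw => PySem.Chars.isIn kw.toList s)) := by
  simp [MRb, kwTable]
lemma MR3 (s : List Char) : MRb s 3 = (["retail", "shopping", "mall"].any (fun kw => PySem.Chars.isIn kw.toList s)) := by
  simp [MRb, kwTable]
lemma MR4 (s : List Char) : MRb s 4 = (["industrial", "logistics", "warehouse"].any (fun kw => PySem.Chars.isIn kw.toList s)) := by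
  simp [MRb, kwTable]
lemma MR5 (s : List Char) : MRb s 5 = (["student", "dormitory"].any (fun kw => PySem.Chars.isIn kw.toList s)) := by
  simp [MRb, kwTable]
lemma MR6 (s : List Char) : MRb s 6 = (["mixed", "multi"].any (fun kw => PySem.Chars.isIn kw.toList s)) := by
  simp [MRb, kwTable]

-- ===== VERDICT (by name: the statement is the Claim_ definition above) =====
lemma chain_eq (s : List Char) :
    (if ["office", "offices"].any (fun kw => PySem.Chars.isIn kw.toList s) then "Office"
     else if ["residential", "apartment", "flat", "homes"].any (fun kw => PySem.Chars.isIn kw.toList s) then "Residential"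
     else if ["hotel", "hospitality"].any (fun kw => PySem.Chars.isIn kw.toList s) then "Hotel"
     else if ["retail", "shopping", "mall"].any (fun kw => PySem.Chars.isIn kw.toList s) then "Retail"
     else if ["industrial", "logistics", "warehouse"].any (fun kw => PySem.Chars.isIn kw.toList s) then "Industrial"
     else if ["student", "dormitory"].any (fun kw => PySem.Chars.isIn kw.toList s) then "Student Housing"
     else if ["mixed", "multi"].any (fun kw => PySem.Chars.isIn kw.toList s) then "Mixed-Use"
     else "Mixed-Use/Other") = labelsB.getD (bestF s) "Mixed-Use/Other" := by
  rw [bestF_eq_spec, MR0, MR1, MR2, MR3, MR4, MR5, MR6]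
  split_ifs <;> simp [labelsB]

theorem classify_asset_py_spec : Claim_equal_classify_asset_py := by
  intro asset_str _
  unfold Spec_classify_asset_py classify_asset_py classify_asset_py_alt
  exact chain_eq (PySem.Str.lower asset_str).toList
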